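-- pv_equiv track=rewrite | github.com/Yeshiva-University-CS/COM3640-F25 | assignment-3/img_utils/bmp_writer_utils.py | _get_color_range
-- ===== SOURCE A (Python) =====
-- def _get_color_range(pixels):
--     """Get the range (max - min) across all color channels."""
--     if not pixels:
--         return 0
--
--     r_vals = [p[0] for p in pixels]
--     g_vals = [p[1] for p in pixels]
--     b_vals = [p[2] for p in pixels]
--
--     r_range = max(r_vals) - min(r_vals)
--     g_range = max(g_vals) - min(g_vals)
--     b_range = max(b_vals) - min(b_vals)
--
--     return max(r_range, g_range, b_range)
-- ===== SOURCE B (Python) =====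
-- def _get_color_range(pixels):
--     """Get the range (max - min) across all color channels."""
--     if not pixels:
--         return 0
--     r_min, g_min, b_min = pixels[0]
--     r_max, g_max, b_max = pixels[0]
--     for r, g, b in pixels[1:]:
--         r_min = min(r_min, r); r_max = max(r_max, r)
--         g_min = min(g_min, g); g_max = max(g_max, g)
--         b_min = min(b_min, b); b_max = max(b_max, b)
--     return max(r_max - r_min, g_max - g_min, b_max - b_min)
-- ===== Notes on version B (the rewrite author's own statement) =====
-- stated objective: simpler
-- what changed: Replaces the three per-channel list comprehensions plus six separate min/max scans with a single streaming pass that maintains six running extrema seeded from the first pixel.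
import Mathlib
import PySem

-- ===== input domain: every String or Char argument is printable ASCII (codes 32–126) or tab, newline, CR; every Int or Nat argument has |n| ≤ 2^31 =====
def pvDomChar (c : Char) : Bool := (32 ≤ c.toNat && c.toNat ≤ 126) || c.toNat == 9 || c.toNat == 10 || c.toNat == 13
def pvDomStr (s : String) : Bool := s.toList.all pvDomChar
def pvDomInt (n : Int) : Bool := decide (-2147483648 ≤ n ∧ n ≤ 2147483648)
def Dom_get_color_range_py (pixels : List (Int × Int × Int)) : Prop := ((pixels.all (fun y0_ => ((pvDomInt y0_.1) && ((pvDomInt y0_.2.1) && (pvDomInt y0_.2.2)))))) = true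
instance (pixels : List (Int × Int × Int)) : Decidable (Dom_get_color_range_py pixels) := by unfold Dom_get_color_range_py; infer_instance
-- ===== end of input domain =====

-- B replaces A's three comprehensions and six min/max scans with one streaming pass over the pixels maintaining six running extrema (objective: simpler).

-- ===== PORT A =====
-- Port of A: per-channel comprehensions, then max-min of each channel, then max of the three ranges.
def get_color_range_py (pixels : List (Int × Int × Int)) : Int :=
  match pixels with
  | [] => 0
  | p :: rest =>
    let r_vals := (p :: rest).map (fun q => q.1)
    let g_vals := (p :: rest).map (fun q => q.2.1)
    let b_vals := (p :: rest).map (fun q => q.2.2)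
    -- lists are nonempty, so max?/min? are some; .getD 0 only discharges the option
    let r_range := ((PySem.List.max? r_vals (fun y => y)).getD 0) - ((PySem.List.min? r_vals (fun y => y)).getD 0)
    let g_range := ((PySem.List.max? g_vals (fun y => y)).getD 0) - ((PySem.List.min? g_vals (fun y => y)).getD 0)
    let b_range := ((PySem.List.max? b_vals (fun y => y)).getD 0) - ((PySem.List.min? b_vals (fun y => y)).getD 0)
    max r_range (max g_range b_range)

-- ===== PORT B =====
-- Port of B: one streaming pass maintaining six running extrema seeded from the first pixel.
def get_color_range_py_alt (pixels : List (Int × Int × Int)) : Int :=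
  match pixels with
  | [] => 0
  | p :: rest =>
    let s := rest.foldl
      (fun (st : Int × Int × Int × Int × Int × Int) q =>
        (min st.1 q.1, max st.2.1 q.1,
         min st.2.2.1 q.2.1, max st.2.2.2.1 q.2.1,
         min st.2.2.2.2.1 q.2.2, max st.2.2.2.2.2 q.2.2))
      (p.1, p.1, p.2.1, p.2.1, p.2.2, p.2.2)
    max (s.2.1 - s.1) (max (s.2.2.2.1 - s.2.2.1) (s.2.2.2.2.2 - s.2.2.2.2.1))

-- ===== PRECONDITION & SPEC =====
def Spec_get_color_range_py (pixels : List (Int × Int × Int)) (out : Int) : Prop := out = get_color_range_py_alt pixels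
instance (pixels : List (Int × Int × Int)) (out : Int) : Decidable (Spec_get_color_range_py pixels out) := by unfold Spec_get_color_range_py; infer_instance

-- ===== CLAIM (what is proved, stated in full; the proofs are below) =====
def Claim_equal_get_color_range_py : Prop := ∀ (pixels : List (Int × Int × Int)), Dom_get_color_range_py pixels → Spec_get_color_range_py pixels (get_color_range_py pixels)

-- ===== LEMMAS AND PROOFS =====

-- ===== VERDICT (by name: the statement is the Claim_ definition above) =====
-- the six-tuple fold splits into six independent folds
theorem fold6_split (rest : List (Int × Int × Int)) (a b c d e f : Int) :
    rest.foldl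
      (fun (st : Int × Int × Int × Int × Int × Int) q =>
        (min st.1 q.1, max st.2.1 q.1,
         min st.2.2.1 q.2.1, max st.2.2.2.1 q.2.1,
         min st.2.2.2.2.1 q.2.2, max st.2.2.2.2.2 q.2.2))
      (a, b, c, d, e, f)
    = (rest.foldl (fun m q => min m q.1) a,
       rest.foldl (fun m q => max m q.1) b,
       rest.foldl (fun m q => min m q.2.1) c,
       rest.foldl (fun m q => max m q.2.1) d,
       rest.foldl (fun m q => min m q.2.2) e,
       rest.foldl (fun m q => max m q.2.2) f) := by
  induction rest generalizing a b c d e f with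
  | nil => rfl
  | cons x t ih => simp [List.foldl, ih]

theorem get_color_range_py_spec : Claim_equal_get_color_range_py := by
  intro pixels _
  unfold Spec_get_color_range_py get_color_range_py get_color_range_py_alt
  match pixels with
  | [] => rfl
  | p :: rest =>
    simp only [List.map, PySem.List.max?_id_cons, PySem.List.min?_id_cons, Option.getD_some,
      fold6_split, List.foldl_map]
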